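-- pv_equiv track=rewrite | github.com/jbschwartz/aoc | 2023/day14.py | _roll_line_west
-- ===== SOURCE A (Python) =====
-- def _roll_line_west(line: list[str]) -> list[str]:
--     """Roll the provided line to the west.
--
--     This is the canonical direction used by all other directions.
--     """
--     new_line = ["."] * len(line)
--
--     current_index = 0
--     for index, char in enumerate(line):
--         if char == "O":
--             new_line[current_index] = "O"
--             current_index += 1
--
--         elif char == "#":
--             new_line[index] = "#"
--             current_index = index + 1
--
--     return new_line
-- ===== SOURCE B (Python) =====
-- def _roll_line_west(line: list[str]) -> list[str]:
--     """Roll the provided line to the west (segment split/count/rebuild)."""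
--     result = []
--     segment = []
--     for char in line:
--         if char == "#":
--             count = segment.count("O")
--             result += ["O"] * count + ["."] * (len(segment) - count)
--             result.append("#")
--             segment = []
--         else:
--             segment.append(char)
--     count = segment.count("O")
--     result += ["O"] * count + ["."] * (len(segment) - count)
--     return result
-- ===== Notes on version B (the rewrite author's own statement) =====
-- stated objective: alternative
-- what changed: Replaces A's preallocated destination array with index-tracking writes by a split-on-walls pipeline: accumulate each wall-free segment, count its rocks and emit O*count + .*rest per segment.
import Mathlib
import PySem

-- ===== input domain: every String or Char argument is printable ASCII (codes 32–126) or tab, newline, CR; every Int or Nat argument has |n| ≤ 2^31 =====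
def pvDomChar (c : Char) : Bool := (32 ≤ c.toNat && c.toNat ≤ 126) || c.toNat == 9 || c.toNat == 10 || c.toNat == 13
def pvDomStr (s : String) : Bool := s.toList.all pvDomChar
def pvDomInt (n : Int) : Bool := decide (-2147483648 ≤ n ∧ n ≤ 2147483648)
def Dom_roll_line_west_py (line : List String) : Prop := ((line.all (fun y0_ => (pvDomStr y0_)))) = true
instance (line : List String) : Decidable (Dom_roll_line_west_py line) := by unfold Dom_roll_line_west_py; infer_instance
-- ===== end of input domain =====

-- B replaces A's preallocated array with index-tracking writes by a split-on-walls
-- segment pipeline (alternative decomposition, same cost).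

-- ===== PORT A =====
-- A's for-loop over enumerate(line), carried as structural recursion over the
-- remaining list with the explicit enumeration index, the destination array
-- new_line and current_index (all writes are in range, see proofs below).
def roll_line_west_py_aux (rest : List String) (index : Nat)
    (new_line : List String) (current_index : Nat) : List String :=
  match rest with
  | [] => new_line
  | c :: rest' =>
    if c == "O" then
      roll_line_west_py_aux rest' (index + 1) (new_line.set current_index "O") (current_index + 1)
    else if c == "#" then
      roll_line_west_py_aux rest' (index + 1) (new_line.set index "#") (index + 1)
    else
      roll_line_west_py_aux rest' (index + 1) new_line current_index

def roll_line_west_py (line : List String) : List String :=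
  roll_line_west_py_aux line 0 (List.replicate line.length ".") 0

-- ===== PORT B =====
-- B's loop: accumulate the current wall-free segment; at each '#' flush it as
-- O*count ++ .*rest ++ ['#']; flush the final segment at the end.
def roll_line_west_py_alt_aux (rest result segment : List String) : List String :=
  match rest with
  | [] => result ++ List.replicate (segment.count "O") "O"
            ++ List.replicate (segment.length - segment.count "O") "."
  | c :: rest' =>
    if c == "#" then
      roll_line_west_py_alt_aux rest'
        (result ++ List.replicate (segment.count "O") "O"
          ++ List.replicate (segment.length - segment.count "O") "." ++ ["#"]) []
    else
      roll_line_west_py_alt_aux rest' result (segment ++ [c])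

def roll_line_west_py_alt (line : List String) : List String :=
  roll_line_west_py_alt_aux line [] []

-- ===== PRECONDITION & SPEC =====
def Spec_roll_line_west_py (line : List String) (out : List String) : Prop := out = roll_line_west_py_alt line
instance (line : List String) (out : List String) : Decidable (Spec_roll_line_west_py line out) := by unfold Spec_roll_line_west_py; infer_instance

-- ===== CLAIM (what is proved, stated in full; the proofs are below) =====
def Claim_equal_roll_line_west_py : Prop := ∀ (line : List String), Dom_roll_line_west_py line → Spec_roll_line_west_py line (roll_line_west_py line)

-- ===== LEMMAS AND PROOFS =====

lemma set_replicate_mid (d k : Nat) (a b : String) :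
    (List.replicate (d + 1 + k) a).set d b
      = List.replicate d a ++ b :: List.replicate k a := by
  induction d with
  | zero => simp [Nat.one_add, List.replicate_succ]
  | succ d ih =>
      have h : d + 1 + 1 + k = (d + 1 + k) + 1 := by omega
      rw [h, List.replicate_succ, List.set_cons_succ, ih]
      simp [List.replicate_succ]

lemma set_append_right' (l₁ l₂ : List String) (n : Nat) (a : String) :
    (l₁ ++ l₂).set (l₁.length + n) a = l₁ ++ l₂.set n a := by
  induction l₁ with
  | nil => simp
  | cons x xs ih => simp [List.set_cons_succ, Nat.succ_add, ih]

-- writing "O" right after the packed run of rocks extends the run into the dots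
lemma set_rock (res : List String) (cnt k : Nat) :
    (res ++ List.replicate cnt "O" ++ List.replicate (k + 1) ".").set (res.length + cnt) "O"
      = res ++ List.replicate (cnt + 1) "O" ++ List.replicate k "." := by
  have h1 : res.length + cnt = (res ++ List.replicate cnt "O").length + 0 := by simp
  rw [List.append_assoc, ← List.append_assoc, h1, set_append_right']
  have h2 : k + 1 = 0 + 1 + k := by omega
  rw [h2, set_replicate_mid 0 k "." "O"]
  simp [List.replicate_succ', List.append_assoc]

-- writing "#" at the enumeration index splits the dots after the current segment
lemma set_wall (res : List String) (cnt d k : Nat) :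
    (res ++ List.replicate cnt "O" ++ List.replicate (d + 1 + k) ".").set
        (res.length + cnt + d) "#"
      = res ++ List.replicate cnt "O" ++ List.replicate d "." ++ ["#"]
          ++ List.replicate k "." := by
  have h1 : res.length + cnt + d = (res ++ List.replicate cnt "O").length + d := by simp
  rw [List.append_assoc, ← List.append_assoc, h1, set_append_right',
    set_replicate_mid d k "." "#"]
  simp [List.append_assoc]

-- the key invariant: A's loop state is B's flushed result, the packed rocks of
-- the current segment, and dots for everything not yet written
lemma roll_aux_eq (rest : List String) : ∀ (res seg : List String),
    roll_line_west_py_aux rest (res.length + seg.length)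
      (res ++ List.replicate (seg.count "O") "O"
        ++ List.replicate (seg.length - seg.count "O" + rest.length) ".")
      (res.length + seg.count "O")
    = roll_line_west_py_alt_aux rest res seg := by
  induction rest with
  | nil =>
      intro res seg
      simp [roll_line_west_py_aux, roll_line_west_py_alt_aux]
  | cons c rest' ih =>
      intro res seg
      have hcnt : seg.count "O" ≤ seg.length := List.count_le_length
      by_cases hO : c = "O"
      · -- rock: goes to position res.length + count, extending the packed run
        subst hO
        rw [roll_line_west_py_aux, if_pos (by simp)]
        have hD : seg.length - seg.count "O" + (("O" :: rest' : List String)).length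
            = (seg.length - seg.count "O" + rest'.length) + 1 := by
          simp only [List.length_cons]; omega
        rw [hD, set_rock res (seg.count "O") (seg.length - seg.count "O" + rest'.length)]
        rw [roll_line_west_py_alt_aux, if_neg (by simp)]
        have H := ih res (seg ++ ["O"])
        rw [show ((seg ++ ["O"] : List String)).length = seg.length + 1 by simp,
          show (seg ++ ["O"]).count "O" = seg.count "O" + 1 by simp [List.count_append],
          show seg.length + 1 - (seg.count "O" + 1) + rest'.length
            = seg.length - seg.count "O" + rest'.length by omega,
          show res.length + (seg.length + 1) = res.length + seg.length + 1 by omega,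
          show res.length + (seg.count "O" + 1) = res.length + seg.count "O" + 1 by omega] at H
        exact H
      · by_cases hH : c = "#"
        · -- wall: written at the enumeration index, just past the segment's dots
          subst hH
          rw [roll_line_west_py_aux, if_neg (by simp), if_pos (by simp)]
          have hidx : res.length + seg.length
              = res.length + seg.count "O" + (seg.length - seg.count "O") := by omega
          have hD : seg.length - seg.count "O" + (("#" :: rest' : List String)).length
              = (seg.length - seg.count "O") + 1 + rest'.length := by
            simp only [List.length_cons]; omega
          rw [hD, hidx, set_wall res (seg.count "O") (seg.length - seg.count "O") rest'.length]
          rw [roll_line_west_py_alt_aux, if_pos (by simp)]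
          have H := ih (res ++ List.replicate (seg.count "O") "O"
              ++ List.replicate (seg.length - seg.count "O") "." ++ ["#"]) []
          simp only [List.count_nil, List.length_nil, List.replicate_zero, List.append_nil,
            List.length_append, List.length_replicate, List.length_cons, Nat.zero_sub,
            Nat.add_zero, Nat.zero_add] at H
          exact H
        · -- anything else rolls away to a dot: segment grows, counts unchanged
          rw [roll_line_west_py_aux, if_neg (by simpa using hO), if_neg (by simpa using hH)]
          rw [roll_line_west_py_alt_aux, if_neg (by simpa using hH)]
          have H := ih res (seg ++ [c])
          rw [show ((seg ++ [c] : List String)).length = seg.length + 1 by simp,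
            show (seg ++ [c]).count "O" = seg.count "O" by simp [List.count_append, hO],
            show seg.length + 1 - seg.count "O" + rest'.length
              = seg.length - seg.count "O" + ((c :: rest' : List String)).length by
                simp only [List.length_cons]; omega,
            show res.length + (seg.length + 1) = res.length + seg.length + 1 by omega] at H
          exact H

-- ===== VERDICT (by name: the statement is the Claim_ definition above) =====
theorem roll_line_west_py_spec : Claim_equal_roll_line_west_py := by
  intro line _
  unfold Spec_roll_line_west_py roll_line_west_py roll_line_west_py_alt
  simpa using roll_aux_eq line [] []
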